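/- GENERATED by farm/mkstatement.py from design/units.tsv (unit `vorbis_deinit.2`) and the assertions of Vorbis/Spec/Alloc.lean — do not edit.
   THE STATEMENT of the proof unit `vorbis_deinit.2`: segment 2 of `vorbis_deinit` (88 instructions; entries 0x107745;
   exits 0x107905; ranges 0x107745-0x107900)
   takes each of its entry assertions to one of its exit assertions (`Vorbis.Spec.vorbis_deinit.Seg2`), given the contracts of its callees.
   What the names mean: Vorbis/Spec/Basic.lean (the shared hypotheses), Vorbis/Spec/Alloc.lean (the assertions). The theorem to prove:
   `theorem vorbis_deinit_2_ok : Vorbis.Spec.vorbis_deinit_2.Statement`. -/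
import Vorbis.Spec.Alloc
namespace Vorbis.Spec.vorbis_deinit_2
open X86 X86.User Asan

/-- The statement of unit `vorbis_deinit.2`. -/
def Statement : Prop :=
  ∀ (Lay : Layout) (_hLay : Lay.hi = 0x1000000) (μ : Microarch) (_hμ : UserX.MicroOK μ) (u₀ : State)
    (_hcode : HasCodeNat Lay u₀ Vorbis.L.vorbis_deinit.entry Vorbis.Code.code_vorbis_deinit.nat Vorbis.L.vorbis_deinit.size)
    (_h_asan_load8_noabort : Asan.SmallCheck Lay μ Vorbis.WayInv (Vorbis.CodeOK u₀) [.rax, .rcx, .rdx] 8 Vorbis.L.__asan_load8_noabort.entry)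
    (_h_setup_free : ∀ (others : List Obj) (frames : List (Nat × FrameLayout)), Calls Lay μ Vorbis.WayInv (Vorbis.conv u₀) Vorbis.L.setup_free.entry (Vorbis.Spec.setup_free.spec others frames))
    (_h_asan_load4_noabort : Asan.SmallCheck Lay μ Vorbis.WayInv (Vorbis.CodeOK u₀) [.rax, .rcx, .rdx] 4 Vorbis.L.__asan_load4_noabort.entry),
    Vorbis.Spec.vorbis_deinit.Seg2 Lay μ u₀

end Vorbis.Spec.vorbis_deinit_2
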